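-- pv_equiv track=rewrite | github.com/fengqiaogh/ocssw_src | ocssw_src/src/scripts/multilevel_processor.py | get_lowest_source_level
-- ===== SOURCE A (Python) =====
-- def get_lowest_source_level(source_files):
--     """
--     Find the level of the lowest level source file to be processed.
--     """
--     order = ['level 1a', 'geo', 'level 1b', 'l2gen',
--             'l2bin', 'l3mapgen']
--     if len(source_files) == 1:
--         return list(source_files.keys())[0]
--     else:
--         lowest = list(source_files.keys())[0]
--         for key in list(source_files.keys())[1:]:
--             # if key < lowest:
--             if order.index(key) < order.index(lowest):
--                 lowest = key
--         return lowest
-- ===== SOURCE B (Python) =====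
-- def get_lowest_source_level(source_files):
--     """
--     Find the level of the lowest level source file to be processed.
--     """
--     order = ['level 1a', 'geo', 'level 1b', 'l2gen',
--              'l2bin', 'l3mapgen']
--     return sorted(source_files, key=order.index)[0]
-- ===== Notes on version B (the rewrite author's own statement) =====
-- stated objective: simpler
-- what changed: B replaces the two-branch running-minimum scan over the keys with a stable sort of the keys by their predefined rank, returning the first element (stability preserves A's first-seen tie-breaking).
-- outside the precondition, e.g. on get_lowest_source_level({'foo': 'x'}): A returns 'foo', B raises ValueError
import Mathlib
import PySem

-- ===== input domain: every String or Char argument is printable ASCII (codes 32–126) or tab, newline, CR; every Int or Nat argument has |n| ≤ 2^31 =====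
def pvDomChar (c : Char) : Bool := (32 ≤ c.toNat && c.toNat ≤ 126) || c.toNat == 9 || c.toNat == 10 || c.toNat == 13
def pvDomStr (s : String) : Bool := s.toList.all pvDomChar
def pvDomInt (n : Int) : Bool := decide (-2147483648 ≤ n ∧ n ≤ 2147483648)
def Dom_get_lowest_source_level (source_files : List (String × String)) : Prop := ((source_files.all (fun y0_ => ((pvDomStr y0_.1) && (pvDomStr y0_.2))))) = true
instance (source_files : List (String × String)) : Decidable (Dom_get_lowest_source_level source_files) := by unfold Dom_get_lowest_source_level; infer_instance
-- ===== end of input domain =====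

-- B finds the lowest-level key by stably sorting the keys by their predefined rank and taking
-- the first, instead of A's singleton special case plus running-minimum scan (objective: simpler).


-- ===== PORT A =====
-- the fixed 'order' list of the Python source
def pvOrder : List String := ["level 1a", "geo", "level 1b", "l2gen", "l2bin", "l3mapgen"]

-- order.index(k); Python raises ValueError for k ∉ order — those inputs are outside Pre_,
-- so the 0 default is never reached on admitted inputs
def pvRank (k : String) : Nat := (PySem.List.index? pvOrder k).getD 0

def get_lowest_source_level (source_files : List (String × String)) : String :=
  if source_files.length == 1 then
    (source_files.map Prod.fst).headD ""   -- list(source_files.keys())[0]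
  else
    match source_files.map Prod.fst with
    | [] => ""                             -- Python raises IndexError here (excluded by Pre_)
    | k :: rest =>
        rest.foldl (fun lowest key => if pvRank key < pvRank lowest then key else lowest) k

-- ===== PORT B =====
def get_lowest_source_level_alt (source_files : List (String × String)) : String :=
  (PySem.List.sorted (source_files.map Prod.fst) (fun k => pvRank k) false).headD ""
  -- [0] of the sorted list; Python raises IndexError on empty input (excluded by Pre_)

-- ===== PRECONDITION & SPEC =====
-- Pre_ excludes the empty dict (both raise IndexError), and dicts containing a key outside the
-- fixed order list: there A raises ValueError — except for a singleton dict, whose key A returns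
-- unvalidated while B's order.index raises ValueError on it.
def Pre_get_lowest_source_level (source_files : List (String × String)) : Prop :=
  source_files ≠ [] ∧ ∀ p ∈ source_files, p.1 ∈ pvOrder
instance (source_files : List (String × String)) : Decidable (Pre_get_lowest_source_level source_files) := by unfold Pre_get_lowest_source_level; infer_instance
def pvWitness_get_lowest_source_level : (List (String × String)) := [("geo", "S2003.L1A")]

def Spec_get_lowest_source_level (source_files : List (String × String)) (out : String) : Prop := out = get_lowest_source_level_alt source_files
instance (source_files : List (String × String)) (out : String) : Decidable (Spec_get_lowest_source_level source_files out) := by unfold Spec_get_lowest_source_level; infer_instance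

-- ===== CLAIM (what is proved, stated in full; the proofs are below) =====
def Claim_equal_get_lowest_source_level : Prop := ∀ (source_files : List (String × String)), Dom_get_lowest_source_level source_files → Pre_get_lowest_source_level source_files → Spec_get_lowest_source_level source_files (get_lowest_source_level source_files)

-- ===== LEMMAS AND PROOFS =====

-- one insertion step of PySem's stable insertion sort, on a nonempty accumulator
theorem insertBy_cons_eq (bef : String → String → Bool) (x h : String) (t : List String) :
    PySem.List.insertBy bef x (h :: t) = if bef x h then x :: h :: t else h :: PySem.List.insertBy bef x t := by
  simp [PySem.List.insertBy]

-- the head of the insertion-sort accumulator is exactly A's running minimum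
theorem head_foldl_insertBy (bef : String → String → Bool) :
    ∀ (rest : List String) (h : String) (t : List String),
      ((rest.foldl (fun acc x => PySem.List.insertBy bef x acc) (h :: t)).headD "")
        = rest.foldl (fun lo x => if bef x lo then x else lo) h := by
  intro rest
  induction rest with
  | nil => intro h t; rfl
  | cons x rest ih =>
      intro h t
      simp only [List.foldl_cons, insertBy_cons_eq]
      by_cases hb : bef x h
      · simp only [hb, if_true, ih]
      · simp only [hb, if_false, Bool.false_eq_true]
        exact ih h (PySem.List.insertBy bef x t)

-- head of sorted(ks, key=rank) = A's strict-less running-minimum scan over ks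
theorem head_sorted_eq_scan (k : String) (rest : List String) :
    (PySem.List.sorted (k :: rest) (fun s => pvRank s) false).headD ""
      = rest.foldl (fun lowest key => if pvRank key < pvRank lowest then key else lowest) k := by
  rw [PySem.List.sorted_eq_foldl_insertBy]
  simp only [List.foldl_cons]
  have h0 : PySem.List.insertBy (fun a b => decide (pvRank a < pvRank b)) k [] = [k] := by
    simp [PySem.List.insertBy]
  rw [h0, head_foldl_insertBy]
  simp

-- ===== VERDICT (by name: the statement is the Claim_ definition above) =====
theorem get_lowest_source_level_spec : Claim_equal_get_lowest_source_level := by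
  intro sf _ hpre
  unfold Spec_get_lowest_source_level get_lowest_source_level get_lowest_source_level_alt
  cases hk : sf.map Prod.fst with
  | nil => exact absurd (List.map_eq_nil_iff.mp hk) hpre.1
  | cons k rest =>
      rw [head_sorted_eq_scan]
      by_cases hl : sf.length = 1
      · have hr : rest = [] := by
          have hlen := congrArg List.length hk
          simp [hl] at hlen
          omega
        simp [hl, hr]
      · simp [hl]
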